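-- pv_equiv track=rewrite | github.com/carpedkm/G_TAD_customizing | gtad_lib/pre_process.py | get_transition_sites
-- ===== SOURCE A (Python) =====
-- def get_transition_sites(class_sequence):
--     """
--     given class sequcne, finds transition sites.
--     args:
--         - class_sequence: the sequence of k-means classes. I recommand using the output of [merge_classes] function
--     """
--     current_class = class_sequence[0]
--     transition_sites = []
--     transition_sites.append(0)
--     for i,val in enumerate(class_sequence):
--         if val != current_class:
--             current_class = val
--             transition_sites.append(i)
--     transition_sites.append(len(class_sequence))
--     return transition_sites
-- ===== SOURCE B (Python) =====
-- def get_transition_sites(class_sequence):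
--     # Segment the sequence into maximal runs of equal values; the boundaries
--     # [0, end-of-run-1, end-of-run-2, ...] are exactly the transition sites
--     # plus the final length.
--     n = len(class_sequence)
--     sites = [0]
--     i = 0
--     while i < n:
--         v = class_sequence[i]
--         while i < n and class_sequence[i] == v:
--             i += 1
--         sites.append(i)
--     return sites
-- ===== Notes on version B (the rewrite author's own statement) =====
-- stated objective: alternative
-- what changed: B segments the sequence into maximal runs with a nested while loop and records cumulative run ends, instead of A's single enumerate loop tracking a current class plus a separate final append of len.
import Mathlib
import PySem

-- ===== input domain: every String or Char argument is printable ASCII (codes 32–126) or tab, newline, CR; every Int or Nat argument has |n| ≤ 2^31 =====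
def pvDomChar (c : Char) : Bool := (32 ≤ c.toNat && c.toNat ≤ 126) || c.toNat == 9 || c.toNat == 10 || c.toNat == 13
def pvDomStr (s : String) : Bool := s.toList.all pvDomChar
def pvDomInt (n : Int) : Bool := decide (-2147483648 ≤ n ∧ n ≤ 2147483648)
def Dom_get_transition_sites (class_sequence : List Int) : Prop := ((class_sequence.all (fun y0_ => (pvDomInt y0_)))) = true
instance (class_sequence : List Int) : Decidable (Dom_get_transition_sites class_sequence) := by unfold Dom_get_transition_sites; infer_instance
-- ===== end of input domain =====

-- B records cumulative run ends of maximal equal runs (nested-while segmentation) instead of A's current-class tracking loop; alternative decomposition, same cost.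

-- ===== PORT A =====
-- the 'for i,val in enumerate(class_sequence)' loop, carrying (current_class, transition_sites, i)
def pvLoopA : Int → List Int → Nat → List Int → List Int
  | _, sites, _, [] => sites
  | cur, sites, i, v :: rest =>
      if v ≠ cur then pvLoopA v (sites ++ [(i : Int)]) (i + 1) rest
      else pvLoopA cur sites (i + 1) rest

def get_transition_sites (class_sequence : List Int) : List Int :=
  match class_sequence with
  | [] => []  -- class_sequence[0] raises IndexError in Python; excluded by Pre_
  | c0 :: _ => pvLoopA c0 [0] 0 class_sequence ++ [(class_sequence.length : Int)]

-- ===== PORT B =====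
-- inner while of Source B: advance i past the run of value v; returns (final i, remaining suffix)
def pvSkip (v : Int) : List Int → Nat → Nat × List Int
  | [], i => (i, [])
  | w :: rest, i => if w = v then pvSkip v rest (i + 1) else (i, w :: rest)

-- outer while of Source B: one iteration per maximal run, appending its cumulative end.
-- fuel (initial list length suffices: each iteration consumes ≥ 1 element) only makes
-- the recursion structural; it never alters the computation.
def pvRunEnds : Nat → List Int → Nat → List Int
  | _, [], _ => []
  | 0, _ :: _, _ => []
  | fuel + 1, v :: rest, i =>
      let p := pvSkip v rest (i + 1)
      (p.1 : Int) :: pvRunEnds fuel p.2 p.1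

def get_transition_sites_alt (class_sequence : List Int) : List Int :=
  0 :: pvRunEnds class_sequence.length class_sequence 0

-- ===== PRECONDITION & SPEC =====
-- Pre_ excludes exactly the empty list, on which A raises IndexError
def Pre_get_transition_sites (class_sequence : List Int) : Prop := class_sequence ≠ []
instance (class_sequence : List Int) : Decidable (Pre_get_transition_sites class_sequence) := by unfold Pre_get_transition_sites; infer_instance
def pvWitness_get_transition_sites : List Int := [1, 1, 2, 2, 2, 1]

def Spec_get_transition_sites (class_sequence : List Int) (out : List Int) : Prop := out = get_transition_sites_alt class_sequence
instance (class_sequence : List Int) (out : List Int) : Decidable (Spec_get_transition_sites class_sequence out) := by unfold Spec_get_transition_sites; infer_instance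

-- ===== CLAIM (what is proved, stated in full; the proofs are below) =====
def Claim_equal_get_transition_sites : Prop := ∀ (class_sequence : List Int), Dom_get_transition_sites class_sequence → Pre_get_transition_sites class_sequence → Spec_get_transition_sites class_sequence (get_transition_sites class_sequence)

-- ===== LEMMAS AND PROOFS =====

-- the transition indices A's loop appends, without the accumulator
def pvMids : Int → Nat → List Int → List Int
  | _, _, [] => []
  | cur, i, v :: rest =>
      if v ≠ cur then (i : Int) :: pvMids v (i + 1) rest
      else pvMids cur (i + 1) rest

theorem pvLoopA_eq_mids : ∀ (l : List Int) (cur : Int) (sites : List Int) (i : Nat),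
    pvLoopA cur sites i l = sites ++ pvMids cur i l
  | [], cur, sites, i => by simp [pvLoopA, pvMids]
  | v :: rest, cur, sites, i => by
      simp only [pvLoopA, pvMids]
      split
      · rw [pvLoopA_eq_mids rest v (sites ++ [(i : Int)]) (i + 1), List.append_assoc]
        simp
      · exact pvLoopA_eq_mids rest cur sites (i + 1)

-- key bridge: while scanning position i inside a run of value cur with suffix l remaining,
-- A's remaining transition indices plus the final length = B's remaining run ends
theorem pvMids_runEnds : ∀ (l : List Int) (cur : Int) (i fuel : Nat), l.length ≤ fuel →
    pvMids cur i l ++ [((i + l.length : Nat) : Int)] =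
      ((pvSkip cur l i).1 : Int) :: pvRunEnds fuel (pvSkip cur l i).2 (pvSkip cur l i).1
  | [], cur, i, fuel, _ => by
      cases fuel <;> simp [pvMids, pvSkip, pvRunEnds]
  | v :: rest, cur, i, fuel, hf => by
      by_cases h : v = cur
      · subst h
        have := pvMids_runEnds rest v (i + 1) fuel (by simpa using Nat.le_of_succ_le hf)
        simp only [pvMids, pvSkip, ne_eq, not_true_eq_false, if_false]
        simpa [Nat.add_comm, Nat.add_left_comm, Nat.add_assoc] using this
      · obtain ⟨f, rfl⟩ : ∃ f, fuel = f + 1 := by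
          cases fuel with
          | zero => exact absurd hf (by simp)
          | succ f => exact ⟨f, rfl⟩
        have hrec := pvMids_runEnds rest v (i + 1) f (by simpa using Nat.le_of_succ_le_succ hf)
        simp only [pvMids, pvSkip, ne_eq, h, not_false_eq_true, if_true]
        rw [List.cons_append]
        congr 1
        simp only [if_false, pvRunEnds]
        have hl : (i + (v :: rest).length) = ((i + 1) + rest.length) := by
          simp [List.length_cons]; omega
        rw [hl]
        exact hrec

-- ===== VERDICT (by name: the statement is the Claim_ definition above) =====
theorem get_transition_sites_spec : Claim_equal_get_transition_sites := by
  intro cs _ hpre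
  unfold Spec_get_transition_sites
  match cs with
  | [] => exact absurd rfl hpre
  | c0 :: t =>
      show pvLoopA c0 [0] 0 (c0 :: t) ++ [((c0 :: t).length : Int)] =
        0 :: pvRunEnds (c0 :: t).length (c0 :: t) 0
      rw [pvLoopA_eq_mids, List.append_assoc]
      have hA : pvMids c0 0 (c0 :: t) = pvMids c0 1 t := by
        simp [pvMids]
      have h := pvMids_runEnds t c0 1 t.length (Nat.le_refl _)
      rw [List.length_cons, pvRunEnds, hA]
      show [(0 : Int)] ++ (pvMids c0 1 t ++ [((c0 :: t).length : Int)]) = _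
      have hl : ((c0 :: t).length : Int) = ((1 + t.length : Nat) : Int) := by
        simp [List.length_cons]; omega
      rw [hl, h]
      rfl
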